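-- pv_equiv track=rewrite | github.com/shogunrohi/ipDetect | ipdetect.py | extend_ip
-- ===== SOURCE A (Python) =====
-- def extend_ip(ip):
--     lst = []
--     temp = ""
--     for chr in ip:
--         if chr == ".":
--             lst.append(temp)
--             temp = ""
--             lst.append(chr)
--         else:
--             temp += chr
--     lst.append(temp)
--     if lst.count('') > 0:
--         for i in range(lst.count('')):
--             lst.remove('')
--         return lst
--     else:
--         return lst
-- ===== SOURCE B (Python) =====
-- def extend_ip(ip):
--     parts = ip.split('.')
--     out = []
--     for i, part in enumerate(parts):
--         if i > 0:
--             out.append('.')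
--         if part:
--             out.append(part)
--     return out
-- ===== Notes on version B (the rewrite author's own statement) =====
-- stated objective: simpler
-- what changed: Replaces the char-by-char accumulator plus the count/remove empty-stripping pass with str.split('.') followed by a single interleaving loop that emits '.' before every part and skips empty parts.
import Mathlib
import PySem

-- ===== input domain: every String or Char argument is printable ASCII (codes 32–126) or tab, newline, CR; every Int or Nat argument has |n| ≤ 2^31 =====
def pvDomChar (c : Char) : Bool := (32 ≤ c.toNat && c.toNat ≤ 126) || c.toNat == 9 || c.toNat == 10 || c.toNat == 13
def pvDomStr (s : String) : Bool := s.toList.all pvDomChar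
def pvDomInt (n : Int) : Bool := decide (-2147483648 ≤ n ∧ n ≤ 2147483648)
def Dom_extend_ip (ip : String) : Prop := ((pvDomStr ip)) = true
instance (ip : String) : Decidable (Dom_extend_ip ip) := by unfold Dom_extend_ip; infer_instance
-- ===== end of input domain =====

-- B replaces A's char accumulator + count/remove('') stripping by split('.') and one interleaving pass (simpler); return values proved equal.

-- ===== PORT A =====
-- character loop: state = (lst, temp); strings kept as List Char, converted once at the end
def extend_ip (ip : String) : List String :=
  let st := ip.toList.foldl
    (fun (st : List (List Char) × List Char) c =>
      if c = '.' then (st.1 ++ [st.2, ['.']], []) else (st.1, st.2 ++ [c]))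
    ([], [])
  let lst := st.1 ++ [st.2]
  let cnt := PySem.List.count lst ([] : List Char)
  let lst :=
    if cnt > 0 then
      -- `for i in range(lst.count('')): lst.remove('')`; remove('') never raises here
      (PySem.List.pyRange 0 (cnt : Int) 1).foldl
        (fun acc _ => (PySem.List.remove? acc ([] : List Char)).getD acc) lst
    else lst
  lst.map (fun cs => String.ofList cs)

-- ===== PORT B =====
-- ip.split('.') (sep nonempty, so Python's split is PySem.Chars.splitOn), then one interleaving pass
def extend_ip_alt (ip : String) : List String :=
  let parts := PySem.Chars.splitOn ip.toList ".".toList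
  let out := (PySem.List.enumerate parts).foldl
    (fun (acc : List (List Char)) (p : Int × List Char) =>
      let acc := if p.1 > 0 then acc ++ [['.']] else acc
      if p.2 ≠ [] then acc ++ [p.2] else acc)
    []
  out.map (fun cs => String.ofList cs)

-- ===== PRECONDITION & SPEC =====
def Spec_extend_ip (ip : String) (out : List String) : Prop := out = extend_ip_alt ip
instance (ip : String) (out : List String) : Decidable (Spec_extend_ip ip out) := by unfold Spec_extend_ip; infer_instance

-- ===== CLAIM (what is proved, stated in full; the proofs are below) =====
def Claim_equal_extend_ip : Prop := ∀ (ip : String), Dom_extend_ip ip → Spec_extend_ip ip (extend_ip ip)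

-- ===== LEMMAS AND PROOFS =====

-- the token/dot sequence A's char loop produces, starting with pending token `temp`
def pvTok (temp : List Char) : List Char → List (List Char)
  | [] => [temp]
  | c :: cs => if c = '.' then temp :: ['.'] :: pvTok [] cs else pvTok (temp ++ [c]) cs

-- simple recursive single-char split, `pre` = pending piece
def pvSp (pre : List Char) : List Char → List (List Char)
  | [] => [pre]
  | c :: cs => if c = '.' then pre :: pvSp [] cs else pvSp (pre ++ [c]) cs

-- interleave a nonempty part list with dots
def pvIl : List (List Char) → List (List Char)
  | [] => []
  | p :: ps => p :: ps.flatMap (fun q => [['.'], q])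

lemma pvSp_ne_nil (pre cs) : pvSp pre cs ≠ [] := by
  induction cs generalizing pre with
  | nil => simp [pvSp]
  | cons c cs ih => by_cases h : c = '.' <;> simp [pvSp, h, ih]

lemma pvTok_eq_il (cs : List Char) : ∀ temp, pvTok temp cs = pvIl (pvSp temp cs) := by
  induction cs with
  | nil => intro temp; simp [pvTok, pvSp, pvIl]
  | cons c cs ih =>
    intro temp
    by_cases h : c = '.'
    · obtain ⟨p, ps, hps⟩ := List.exists_cons_of_ne_nil (pvSp_ne_nil [] cs)
      simp [pvTok, pvSp, h, ih, hps, pvIl]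
    · simp [pvTok, pvSp, h, ih]

lemma loopA (cs : List Char) : ∀ lst temp,
    (cs.foldl (fun (st : List (List Char) × List Char) c =>
      if c = '.' then (st.1 ++ [st.2, ['.']], []) else (st.1, st.2 ++ [c])) (lst, temp)).1
    ++ [(cs.foldl (fun (st : List (List Char) × List Char) c =>
      if c = '.' then (st.1 ++ [st.2, ['.']], []) else (st.1, st.2 ++ [c])) (lst, temp)).2]
    = lst ++ pvTok temp cs := by
  induction cs with
  | nil => intro lst temp; simp [pvTok]
  | cons c cs ih =>
    intro lst temp
    by_cases h : c = '.'
    · simp [h, pvTok, ih]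
    · simp [h, pvTok, ih]

-- one Python `lst.remove('')` step (with the never-used fallback)
def pvStep (l : List (List Char)) : List (List Char) :=
  (PySem.List.remove? l ([] : List Char)).getD l

def pvStepN : Nat → List (List Char) → List (List Char)
  | 0, l => l
  | n + 1, l => pvStepN n (pvStep l)

lemma pvStep_cons_ne {h : List Char} (t) (hh : h ≠ []) : pvStep (h :: t) = h :: pvStep t := by
  simp [pvStep, PySem.List.remove?, List.idxOf?_cons, hh]
  cases hfind : List.idxOf? ([] : List Char) t <;> simp [List.eraseIdx]

lemma pvStep_cons_nil (t) : pvStep ([] :: t) = t := by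
  simp [pvStep, PySem.List.remove?, List.idxOf?_cons, List.eraseIdx]

lemma pvStepN_cons_ne {h : List Char} (n t) (hh : h ≠ []) :
    pvStepN n (h :: t) = h :: pvStepN n t := by
  induction n generalizing t with
  | zero => rfl
  | succ n ih => simp [pvStepN, pvStep_cons_ne _ hh, ih]

lemma pvStepN_count (l : List (List Char)) :
    pvStepN (l.count ([] : List Char)) l = l.filter (· ≠ ([] : List Char)) := by
  induction l with
  | nil => rfl
  | cons h t ih =>
    by_cases hh : h = ([] : List Char)
    · subst hh
      simp only [List.count_cons_self]
      simpa [pvStepN, pvStep_cons_nil, List.filter_cons] using ih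
    · rw [List.count_cons_of_ne (by simpa using hh), pvStepN_cons_ne _ _ hh, ih]
      simp [hh]

lemma foldl_const_step (r : List Int) : ∀ (l : List (List Char)),
    r.foldl (fun acc _ => pvStep acc) l = pvStepN r.length l := by
  induction r with
  | nil => intro l; rfl
  | cons x r ih => intro l; simp [pvStepN, ih]

lemma pvCount_eq (l : List (List Char)) (v : List Char) : PySem.List.count l v = l.count v := by
  simp [PySem.List.count, List.count]

-- A's final value: filter of the token/dot sequence
lemma extend_ip_char (ip : String) :
    extend_ip ip = ((pvTok [] ip.toList).filter (· ≠ ([] : List Char))).map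
      (fun cs => String.ofList cs) := by
  unfold extend_ip
  simp only []
  have hA := loopA ip.toList [] []
  simp only [List.nil_append] at hA
  rw [hA]
  by_cases hc : PySem.List.count (pvTok [] ip.toList) ([] : List Char) > 0
  · simp only [hc, if_pos]
    rw [show (fun (acc : List (List Char)) (_ : Int) =>
        (PySem.List.remove? acc ([] : List Char)).getD acc) = fun acc _ => pvStep acc from rfl]
    rw [foldl_const_step]
    have hlen : (PySem.List.pyRange 0 ((PySem.List.count (pvTok [] ip.toList) ([] : List Char) : Nat) : Int) 1).length
        = PySem.List.count (pvTok [] ip.toList) ([] : List Char) := by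
      rw [PySem.List.pyRange_zero_natCast]; simp
    rw [hlen, pvCount_eq, pvStepN_count]
  · simp only [hc, if_neg, not_false_iff]
    have h0 : (pvTok [] ip.toList).count ([] : List Char) = 0 := by
      have := pvCount_eq (pvTok [] ip.toList) ([] : List Char); omega
    rw [List.filter_eq_self.mpr]
    intro a ha
    have : a ≠ ([] : List Char) := by
      intro h; subst h
      exact absurd (List.count_pos_iff.mpr ha) (by omega)
    simpa using this

-- splitOn.go with enough fuel is pvSp
lemma go_eq_sp : ∀ (fuel : Nat) (l cur : List Char) (acc : List (List Char)),
    l.length < fuel →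
    PySem.Chars.splitOn.go ['.'] fuel l cur acc = acc.reverse ++ pvSp cur.reverse l := by
  intro fuel
  induction fuel with
  | zero => intro l cur acc h; omega
  | succ n ih =>
    intro l cur acc h
    cases l with
    | nil => simp [PySem.Chars.splitOn.go, pvSp]
    | cons c rest =>
      by_cases hc : c = '.'
      · subst hc
        have hpre : (['.'] : List Char).isPrefixOf ('.' :: rest) = true := by
          simp [List.isPrefixOf]
        rw [PySem.Chars.splitOn.go]
        simp only [hpre, if_pos, List.length_cons, List.length_nil, List.drop_succ_cons,
          List.drop_zero]
        rw [ih rest [] (cur.reverse :: acc) (by simpa using Nat.lt_of_succ_lt_succ h)]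
        simp [pvSp]
      · have hpre : (['.'] : List Char).isPrefixOf (c :: rest) = false := by
          simp [List.isPrefixOf]; intro h'; exact absurd h'.symm hc
        rw [PySem.Chars.splitOn.go]
        simp only [hpre, Bool.false_eq_true, if_false]
        rw [ih rest (c :: cur) acc (by simpa using Nat.lt_of_succ_lt_succ h)]
        simp [pvSp, hc]

lemma splitOn_eq_sp (cs : List Char) : PySem.Chars.splitOn cs ['.'] = pvSp [] cs := by
  unfold PySem.Chars.splitOn
  rw [go_eq_sp (cs.length + 1) cs [] [] (by omega)]
  simp

-- B's loop body after the first element (all indices ≥ 1)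
lemma loopB_tail (ps : List (List Char)) : ∀ (acc : List (List Char)) (s : Int), 0 < s →
    (PySem.List.enumerate ps s).foldl
      (fun (acc : List (List Char)) (p : Int × List Char) =>
        if p.2 ≠ [] then (if p.1 > 0 then acc ++ [['.']] else acc) ++ [p.2]
        else (if p.1 > 0 then acc ++ [['.']] else acc)) acc
    = acc ++ ps.flatMap (fun q => ['.'] :: if q ≠ [] then [q] else []) := by
  induction ps with
  | nil => intro acc s _; simp [PySem.List.enumerate]
  | cons q ps ih =>
    intro acc s hs
    rw [PySem.List.enumerate_cons]
    by_cases hq : q = ([] : List Char)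
    · subst hq
      simp only [List.foldl_cons, ne_eq, not_true_eq_false, if_false, hs, if_pos]
      rw [ih _ (s + 1) (by omega)]
      simp
    · simp only [List.foldl_cons, ne_eq, hq, not_false_iff, if_pos, hs]
      rw [ih _ (s + 1) (by omega)]
      simp [hq]

-- filtering the interleaving keeps every dot and drops empty parts
lemma filter_il (p : List Char) (ps : List (List Char)) :
    (pvIl (p :: ps)).filter (· ≠ ([] : List Char))
      = (if p ≠ [] then [p] else []) ++ ps.flatMap (fun q => ['.'] :: if q ≠ [] then [q] else []) := by
  have h2 : (ps.flatMap (fun q => [['.'], q])).filter (· ≠ ([] : List Char))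
      = ps.flatMap (fun q => ['.'] :: if q ≠ [] then [q] else []) := by
    rw [List.filter_flatMap]
    refine List.flatMap_congr ?_
    intro q _
    by_cases hq : q = ([] : List Char) <;> simp [hq]
  rw [show pvIl (p :: ps) = p :: ps.flatMap (fun q => [['.'], q]) from rfl,
    List.filter_cons, h2]
  by_cases hp : p = ([] : List Char) <;> simp [hp]

lemma extend_ip_alt_char (ip : String) :
    extend_ip_alt ip = ((pvTok [] ip.toList).filter (· ≠ ([] : List Char))).map
      (fun cs => String.ofList cs) := by
  unfold extend_ip_alt
  simp only []
  have hsep : (".".toList : List Char) = ['.'] := rfl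
  rw [hsep, splitOn_eq_sp]
  obtain ⟨p, ps, hps⟩ := List.exists_cons_of_ne_nil (pvSp_ne_nil [] ip.toList)
  rw [pvTok_eq_il, hps, filter_il]
  rw [PySem.List.enumerate_cons]
  simp only [List.foldl_cons, gt_iff_lt, lt_self_iff_false, if_false]
  by_cases hp : p = ([] : List Char)
  · subst hp
    have h := loopB_tail ps [] 1 (by omega)
    simp only [ne_eq, gt_iff_lt, ite_not, List.nil_append] at h
    simp [h]
  · have h := loopB_tail ps [p] 1 (by omega)
    simp only [ne_eq, gt_iff_lt, ite_not] at h
    simp [hp, h]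

-- ===== VERDICT (by name: the statement is the Claim_ definition above) =====
theorem extend_ip_spec : Claim_equal_extend_ip := by
  intro ip _
  unfold Spec_extend_ip
  rw [extend_ip_char, extend_ip_alt_char]
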